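-- pv_equiv track=rewrite | github.com/venkateshannabathina/project-ningen | memory_store.py | _extract_target_customer
-- ===== SOURCE A (Python) =====
-- def _extract_target_customer(cmo_briefing: str) -> str:
--     """Extract target customer from CMO briefing text."""
--     if not cmo_briefing:
--         return "professionals seeking productivity solutions"
--
--     lines = cmo_briefing.split("\n")
--     for i, line in enumerate(lines):
--         if "TARGET CUSTOMER" in line.upper():
--             # Get next non-empty, non-header line
--             for next_line in lines[i+1:]:
--                 next_line = next_line.strip()
--                 if next_line and not next_line.startswith("#"):
--                     return next_line
--             break
--
--     return "professionals seeking productivity solutions"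
-- ===== SOURCE B (Python) =====
-- def _extract_target_customer(cmo_briefing: str) -> str:
--     """Reverse single pass: fold over the lines back-to-front, carrying the
--     nearest valid candidate line below the current position; each marker line
--     seen overwrites the result with that candidate, so the final result is the
--     candidate after the topmost marker (or the default)."""
--     default = "professionals seeking productivity solutions"
--     result = default
--     nearest_below = default
--     for line in reversed(cmo_briefing.split("\n")):
--         if "TARGET CUSTOMER" in line.upper():
--             result = nearest_below
--         stripped = line.strip()
--         if stripped and not stripped.startswith("#"):
--             nearest_below = stripped
--     return result
-- ===== Notes on version B (the rewrite author's own statement) =====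
-- stated objective: alternative
-- what changed: A scans forward for the marker and then runs a nested inner scan over lines[i+1:] with early returns; B is a reverse fold over the lines carrying the nearest valid candidate below each position, overwriting the result at each marker line, so no nested loop and no early return.
import Mathlib
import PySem

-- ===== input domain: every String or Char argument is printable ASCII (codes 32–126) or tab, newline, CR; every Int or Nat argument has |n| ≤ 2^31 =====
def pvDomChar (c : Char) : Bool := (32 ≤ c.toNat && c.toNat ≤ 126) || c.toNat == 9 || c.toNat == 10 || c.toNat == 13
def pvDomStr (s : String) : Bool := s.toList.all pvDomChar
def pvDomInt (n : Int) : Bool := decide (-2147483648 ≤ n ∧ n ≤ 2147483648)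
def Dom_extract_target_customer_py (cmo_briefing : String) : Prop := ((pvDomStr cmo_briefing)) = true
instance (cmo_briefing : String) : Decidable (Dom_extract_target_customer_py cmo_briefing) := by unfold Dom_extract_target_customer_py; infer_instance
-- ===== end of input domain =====

-- B replaces A's forward marker search with nested inner scan by one reverse fold over the lines carrying the nearest valid candidate below each position (alternative decomposition, same result).


-- ===== PORT A =====
-- inner 'for next_line in lines[i+1:]' loop: first stripped non-empty, non-'#' line (none = loop falls through)
def pvA_inner : List String → Option String
  | [] => none
  | l :: ls =>
    let nl := PySem.Str.strip l
    if nl ≠ "" && !(PySem.Str.startswith nl "#") then some nl else pvA_inner ls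

-- outer 'for i, line in enumerate(lines)' loop: on the first marker line run the inner loop, then break
def pvA_outer : List String → Option String
  | [] => none
  | l :: ls =>
    if PySem.Str.isIn "TARGET CUSTOMER" (PySem.Str.upper l) then pvA_inner ls else pvA_outer ls

def extract_target_customer_py (cmo_briefing : String) : String :=
  if cmo_briefing = "" then "professionals seeking productivity solutions"
  else
    match pvA_outer ((PySem.Str.split? cmo_briefing "\n").getD []) with
    | some r => r
    | none => "professionals seeking productivity solutions"

-- ===== PORT B =====
-- one step of the reverse fold; state = (result, nearest valid candidate below the current line)
def pvB_step (st : String × String) (line : String) : String × String :=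
  let result := if PySem.Str.isIn "TARGET CUSTOMER" (PySem.Str.upper line) then st.2 else st.1
  let stripped := PySem.Str.strip line
  let nearest := if stripped ≠ "" && !(PySem.Str.startswith stripped "#") then stripped else st.2
  (result, nearest)

def extract_target_customer_py_alt (cmo_briefing : String) : String :=
  let d := "professionals seeking productivity solutions"
  ((((PySem.Str.split? cmo_briefing "\n").getD []).reverse).foldl pvB_step (d, d)).1

-- ===== PRECONDITION & SPEC =====
def Spec_extract_target_customer_py (cmo_briefing : String) (out : String) : Prop := out = extract_target_customer_py_alt cmo_briefing
instance (cmo_briefing : String) (out : String) : Decidable (Spec_extract_target_customer_py cmo_briefing out) := by unfold Spec_extract_target_customer_py; infer_instance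

-- ===== CLAIM (what is proved, stated in full; the proofs are below) =====
def Claim_equal_extract_target_customer_py : Prop := ∀ (cmo_briefing : String), Dom_extract_target_customer_py cmo_briefing → Spec_extract_target_customer_py cmo_briefing (extract_target_customer_py cmo_briefing)

-- ===== LEMMAS AND PROOFS =====
-- the reverse fold computes (A's outer-loop value, A's inner-loop value), each with the default plugged in
lemma pvB_fold_eq (ls : List String) :
    (ls.reverse).foldl pvB_step
      ("professionals seeking productivity solutions", "professionals seeking productivity solutions")
    = ((pvA_outer ls).getD "professionals seeking productivity solutions",
       (pvA_inner ls).getD "professionals seeking productivity solutions") := by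
  induction ls with
  | nil => rfl
  | cons l ls ih =>
    rw [List.reverse_cons, List.foldl_append, ih]
    simp only [List.foldl, pvB_step, pvA_outer, pvA_inner]
    split_ifs <;> simp_all

-- ===== VERDICT (by name: the statement is the Claim_ definition above) =====
theorem extract_target_customer_py_spec : Claim_equal_extract_target_customer_py := by
  intro s _
  unfold Spec_extract_target_customer_py extract_target_customer_py extract_target_customer_py_alt
  simp only [pvB_fold_eq]
  split_ifs with h
  · subst h; decide
  · cases pvA_outer ((PySem.Str.split? s "\n").getD []) <;> rfl
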